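-- pv_equiv track=rewrite | github.com/AxFrancois/SudokuSolver | SolveurSudoku.py | fLineVerif
-- ===== SOURCE A (Python) =====
-- def fLineVerif(pLine):
--     PossibleNumber = [1,2,3,4,5,6,7,8,9]
--     for element in pLine:
--         if element in PossibleNumber:
--             PossibleNumber.remove(element)
--     if len(PossibleNumber) == 1:
--         Valren = PossibleNumber[0]
--     else:
--         Valren = 0
--     return Valren
-- ===== SOURCE B (Python) =====
-- def fLineVerif(pLine):
--     present = {x for x in pLine if x in (1, 2, 3, 4, 5, 6, 7, 8, 9)}
--     if len(present) == 8:
--         return int(45 - sum(present))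
--     else:
--         return 0
-- ===== Notes on version B (the rewrite author's own statement) =====
-- stated objective: simpler
-- what changed: Replaces A's candidate-pool elimination loop (mutating a list of 1..9 via membership tests and remove) with a set comprehension of the digits present and the closed-form identity 45 - sum(present) for the single missing digit.
import Mathlib
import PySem

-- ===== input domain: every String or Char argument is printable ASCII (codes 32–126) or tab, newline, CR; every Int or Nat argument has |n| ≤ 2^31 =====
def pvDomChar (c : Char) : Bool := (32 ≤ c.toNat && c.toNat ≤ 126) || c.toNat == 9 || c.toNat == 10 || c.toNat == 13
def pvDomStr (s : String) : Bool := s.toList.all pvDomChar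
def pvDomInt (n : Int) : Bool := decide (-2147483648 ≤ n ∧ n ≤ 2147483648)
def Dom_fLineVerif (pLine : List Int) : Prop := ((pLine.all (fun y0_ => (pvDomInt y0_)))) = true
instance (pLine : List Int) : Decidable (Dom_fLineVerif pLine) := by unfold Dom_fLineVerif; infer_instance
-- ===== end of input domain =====

-- B replaces A's candidate-pool elimination loop with the closed-form 45 - sum of the present digits (simpler).

-- ===== PORT A =====
def fLineVerif (pLine : List Int) : Int :=
  let pool := pLine.foldl
    (fun p element =>
      if p.contains element then (PySem.List.remove? p element).getD p else p)
    [1, 2, 3, 4, 5, 6, 7, 8, 9]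
  if pool.length = 1 then (PySem.List.pyGet? pool 0).getD 0 else 0

-- ===== PORT B =====
def fLineVerif_alt (pLine : List Int) : Int :=
  let present : PySem.Set Int :=
    PySem.Set.ofList (pLine.filter (fun x => ([1, 2, 3, 4, 5, 6, 7, 8, 9] : List Int).contains x))
  if PySem.Set.len present = 8 then 45 - present.sum else 0

-- ===== PRECONDITION & SPEC =====
def Spec_fLineVerif (pLine : List Int) (out : Int) : Prop := out = fLineVerif_alt pLine
instance (pLine : List Int) (out : Int) : Decidable (Spec_fLineVerif pLine out) := by unfold Spec_fLineVerif; infer_instance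

-- ===== CLAIM (what is proved, stated in full; the proofs are below) =====
def Claim_equal_fLineVerif : Prop := ∀ (pLine : List Int), Dom_fLineVerif pLine → Spec_fLineVerif pLine (fLineVerif pLine)

-- ===== LEMMAS AND PROOFS =====

-- A's loop, starting from a duplicate-free pool, ends with the pool filtered by non-membership in pLine.
theorem pool_foldl_eq_filter (l : List Int) :
    ∀ (p : List Int), p.Nodup →
      l.foldl (fun p element =>
        if p.contains element then (PySem.List.remove? p element).getD p else p) p
      = p.filter (fun d => !(l.contains d)) := by
  induction l with
  | nil => intro p _; simp
  | cons e l ih =>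
    intro p hp
    by_cases he : e ∈ p
    · have hc : p.contains e = true := by simpa using he
      have hrm : PySem.List.remove? p e = some (p.erase e) :=
        PySem.List.remove?_eq_some_erase p e he
      have herase : p.erase e = p.filter (fun d => !(d == e)) := by
        simpa using hp.erase_eq_filter e
      simp only [List.foldl_cons, hc, if_true, hrm, Option.getD_some]
      rw [ih _ (hp.erase e), herase, List.filter_filter]
      apply List.filter_congr
      intro x _
      by_cases hxe : x = e <;> simp [hxe]
    · have hc : p.contains e = false := by simpa using he
      simp only [List.foldl_cons, hc, Bool.false_eq_true, if_false]
      rw [ih _ hp]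
      apply List.filter_congr
      intro x hx
      have : x ≠ e := fun h => he (h ▸ hx)
      simp [this]

-- the key arithmetic fact: the two conditionals agree, by case analysis on which digits occur
theorem key_bools (xs : List Int) :
    (let p := ([1, 2, 3, 4, 5, 6, 7, 8, 9] : List Int).filter (fun d => !(xs.contains d));
     if p.length = 1 then (PySem.List.pyGet? p 0).getD 0 else 0)
    = (let q := ([1, 2, 3, 4, 5, 6, 7, 8, 9] : List Int).filter (fun d => xs.contains d);
       if (q.length : Int) = 8 then 45 - q.sum else 0) := by
  simp only [List.filter_cons, List.filter_nil]
  generalize xs.contains 1 = x1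
  generalize xs.contains 2 = x2
  generalize xs.contains 3 = x3
  generalize xs.contains 4 = x4
  generalize xs.contains 5 = x5
  generalize xs.contains 6 = x6
  generalize xs.contains 7 = x7
  generalize xs.contains 8 = x8
  generalize xs.contains 9 = x9
  revert x1 x2 x3 x4 x5 x6 x7 x8 x9
  decide

-- B's set of present values is a permutation of the digits-present filter
theorem present_perm (pLine : List Int) :
    (PySem.Set.ofList
      (pLine.filter (fun x => ([1, 2, 3, 4, 5, 6, 7, 8, 9] : List Int).contains x))).Perm
      (([1, 2, 3, 4, 5, 6, 7, 8, 9] : List Int).filter (fun d => pLine.contains d)) := by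
  rw [List.perm_ext_iff_of_nodup (PySem.Set.nodup_ofList _)
    ((by decide : (([1,2,3,4,5,6,7,8,9] : List Int)).Nodup).filter _)]
  intro a
  simp only [PySem.Set.mem_ofList, List.mem_filter, List.contains_eq_mem,
    decide_eq_true_iff]
  tauto

-- ===== VERDICT (by name: the statement is the Claim_ definition above) =====
theorem fLineVerif_spec : Claim_equal_fLineVerif := by
  intro pLine _
  unfold Spec_fLineVerif fLineVerif fLineVerif_alt
  rw [pool_foldl_eq_filter pLine _ (by decide)]
  have hperm := present_perm pLine
  have hlen := hperm.length_eq
  have hsum := hperm.sum_eq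
  simp only [PySem.Set.len, hlen, hsum]
  have h := key_bools pLine
  simpa [List.contains_eq_mem] using h
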